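-- pv_equiv track=rewrite | github.com/Darshan-D/DSA_IB | Arrays/perfect_peak_of_array.py | perfectPeak
-- ===== SOURCE A (Python) =====
-- def perfectPeak(A):
--     for i in range(1, len(A)-1):
--         restart = False
--         #checks if the elements on the right of A[i] are lesser
--         for r in range(i+1, len(A)):
--             if(A[i] < A[r]):
--                 continue
--             else:
--                 restart = True
--                 break
--         #checks if the elements on the left are greater
--         for l in range(i-1, -1, -1):
--             if(A[i] > A[l]):
--                 continue
--             else:
--                 restart = True
--                 break
--
--         #checks if restart is true, if it is true, the control is sent back to the outer loop to
--         #check the aforementioned conditions for the next element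
--         if restart:
--             continue
--         return 1
--     return 0
-- ===== SOURCE B (Python) =====
-- def perfectPeak(A):
--     n = len(A)
--     if n < 3:
--         return 0
--     pref = []
--     m = A[0]
--     for x in A:
--         m = max(m, x)
--         pref.append(m)
--     suf = []
--     m = A[-1]
--     for x in reversed(A):
--         m = min(m, x)
--         suf.append(m)
--     suf.reverse()
--     for p, x, s in zip(pref, A[1:], suf[2:]):
--         if p < x < s:
--             return 1
--     return 0
-- ===== Notes on version B (the rewrite author's own statement) =====
-- stated objective: faster
-- what changed: Replaced A's per-index rescans of the whole left and right parts by one prefix-maximum pass and one suffix-minimum pass, then a single zip scan checking each candidate peak in O(1).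
import Mathlib
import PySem

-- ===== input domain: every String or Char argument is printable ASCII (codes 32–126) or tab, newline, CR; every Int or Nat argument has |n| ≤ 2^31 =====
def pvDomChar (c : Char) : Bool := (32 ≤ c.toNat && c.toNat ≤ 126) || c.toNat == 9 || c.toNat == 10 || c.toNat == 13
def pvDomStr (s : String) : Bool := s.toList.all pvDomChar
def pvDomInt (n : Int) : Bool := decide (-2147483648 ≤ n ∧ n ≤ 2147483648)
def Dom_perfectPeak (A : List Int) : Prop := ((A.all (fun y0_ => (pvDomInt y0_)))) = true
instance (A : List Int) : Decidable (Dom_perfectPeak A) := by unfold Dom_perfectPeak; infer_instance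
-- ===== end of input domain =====

-- B replaces A's quadratic per-index rescans by one prefix-max pass, one suffix-min pass
-- and a single O(1)-per-index check (objective: faster, asymptotic).

-- ===== PORT A =====
-- inner loop "for r in range(i+1, len(A))": returns the final value of `restart` set by this loop
def aInnerR (A : List Int) (xi : Int) : List Int → Bool
  | [] => false
  | r :: rest => if xi < PySem.List.pyGetD A r 0 then aInnerR A xi rest else true

-- inner loop "for l in range(i-1, -1, -1)"
def aInnerL (A : List Int) (xi : Int) : List Int → Bool
  | [] => false
  | l :: rest => if xi > PySem.List.pyGetD A l 0 then aInnerL A xi rest else true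

-- outer loop "for i in range(1, len(A)-1)" with its early `return 1`
def aOuter (A : List Int) : List Int → Int
  | [] => 0
  | i :: rest =>
    let xi := PySem.List.pyGetD A i 0
    let rb := aInnerR A xi (PySem.List.pyRange (i + 1) (A.length : Int) 1)
    let restart := rb || aInnerL A xi (PySem.List.pyRange (i - 1) (-1) (-1))
    if restart then aOuter A rest else 1

def perfectPeak (A : List Int) : Int :=
  aOuter A (PySem.List.pyRange 1 ((A.length : Int) - 1) 1)

-- ===== PORT B =====
-- "m = max(m, x); pref.append(m)" running-maximum loop
def runMax (m : Int) : List Int → List Int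
  | [] => []
  | x :: xs => max m x :: runMax (max m x) xs

-- "m = min(m, x); suf.append(m)" running-minimum loop (over reversed(A))
def runMin (m : Int) : List Int → List Int
  | [] => []
  | x :: xs => min m x :: runMin (min m x) xs

-- "for p, x, s in zip(pref, A[1:], suf[2:]): if p < x < s: return 1"
def bZip : List Int → List Int → List Int → Int
  | p :: ps, x :: xs, s :: ss => if p < x ∧ x < s then 1 else bZip ps xs ss
  | _, _, _ => 0

def perfectPeak_alt (A : List Int) : Int :=
  if A.length < 3 then 0
  else
    let pref := runMax (PySem.List.pyGetD A 0 0) A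
    let suf := (runMin (PySem.List.pyGetD A (-1) 0) A.reverse).reverse
    bZip pref (PySem.List.slice A (some 1) none) (PySem.List.slice suf (some 2) none)

-- ===== PRECONDITION & SPEC =====
def Spec_perfectPeak (A : List Int) (out : Int) : Prop := out = perfectPeak_alt A
instance (A : List Int) (out : Int) : Decidable (Spec_perfectPeak A out) := by unfold Spec_perfectPeak; infer_instance

-- ===== CLAIM (what is proved, stated in full; the proofs are below) =====
def Claim_equal_perfectPeak : Prop := ∀ (A : List Int), Dom_perfectPeak A → Spec_perfectPeak A (perfectPeak A)

-- ===== LEMMAS AND PROOFS =====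

theorem length_runMax (m : Int) (l : List Int) : (runMax m l).length = l.length := by
  induction l generalizing m with
  | nil => rfl
  | cons x xs ih => simp [runMax, ih]

theorem length_runMin (m : Int) (l : List Int) : (runMin m l).length = l.length := by
  induction l generalizing m with
  | nil => rfl
  | cons x xs ih => simp [runMin, ih]

theorem runMax_getElem (l : List Int) (m : Int) (k : Nat) (h : k < l.length) :
    (runMax m l)[k]'(by rw [length_runMax]; exact h) = (l.take (k + 1)).foldl max m := by
  induction l generalizing m k with
  | nil => simp at h
  | cons x xs ih =>
    cases k with
    | zero => simp [runMax]
    | succ k =>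
      simp only [runMax, List.getElem_cons_succ, List.take_succ_cons, List.foldl_cons]
      exact ih (max m x) k (by simpa using h)

theorem runMin_getElem (l : List Int) (m : Int) (k : Nat) (h : k < l.length) :
    (runMin m l)[k]'(by rw [length_runMin]; exact h) = (l.take (k + 1)).foldl min m := by
  induction l generalizing m k with
  | nil => simp at h
  | cons x xs ih =>
    cases k with
    | zero => simp [runMin]
    | succ k =>
      simp only [runMin, List.getElem_cons_succ, List.take_succ_cons, List.foldl_cons]
      exact ih (min m x) k (by simpa using h)

theorem bZip_nil₂ (ps ss : List Int) : bZip ps [] ss = 0 := by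
  cases ps <;> rfl

theorem bZip_nil₃ (ps xs : List Int) : bZip ps xs [] = 0 := by
  cases ps <;> cases xs <;> rfl

theorem foldl_max_lt_iff (t : List Int) (m x : Int) :
    t.foldl max m < x ↔ m < x ∧ ∀ y ∈ t, y < x := by
  constructor
  · intro h
    exact ⟨lt_of_le_of_lt (PySem.List.le_foldl_max t m).1 h,
      fun y hy => lt_of_le_of_lt ((PySem.List.le_foldl_max t m).2 y hy) h⟩
  · rintro ⟨hm, ht⟩
    rcases PySem.List.foldl_max_mem t m with h | h
    · rw [h]; exact hm
    · exact ht _ h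

theorem lt_foldl_min_iff (t : List Int) (m x : Int) :
    x < t.foldl min m ↔ x < m ∧ ∀ y ∈ t, x < y := by
  constructor
  · intro h
    exact ⟨lt_of_lt_of_le h (PySem.List.foldl_min_le t m).1,
      fun y hy => lt_of_lt_of_le h ((PySem.List.foldl_min_le t m).2 y hy)⟩
  · rintro ⟨hm, ht⟩
    rcases PySem.List.foldl_min_mem t m with h | h
    · rw [h]; exact hm
    · exact ht _ h

theorem aInnerR_any (A : List Int) (xi : Int) (l : List Int) :
    aInnerR A xi l = l.any (fun r => ! decide (xi < PySem.List.pyGetD A r 0)) := by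
  induction l with
  | nil => rfl
  | cons r rest ih =>
    simp only [aInnerR, List.any_cons]
    by_cases h : xi < PySem.List.pyGetD A r 0 <;> simp [h, ih]

theorem aInnerL_any (A : List Int) (xi : Int) (l : List Int) :
    aInnerL A xi l = l.any (fun r => ! decide (PySem.List.pyGetD A r 0 < xi)) := by
  induction l with
  | nil => rfl
  | cons r rest ih =>
    simp only [aInnerL, List.any_cons]
    by_cases h : PySem.List.pyGetD A r 0 < xi <;> simp [h, ih, gt_iff_lt]

theorem rb_iff (A : List Int) (xi : Int) (j : Nat) :
    aInnerR A xi (PySem.List.pyRange (j : Int) (A.length : Int) 1) = false ↔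
      ∀ y ∈ A.drop j, xi < y := by
  rw [aInnerR_any]
  have hmap := PySem.List.map_pyGetD_pyRange' A 0 (a := (j : Int)) (by positivity)
  rw [show (fun r => ! decide (xi < PySem.List.pyGetD A r 0))
        = ((fun y => ! decide (xi < y)) ∘ (fun r => PySem.List.pyGetD A r 0)) from rfl,
      ← List.any_map, hmap]
  simp

theorem map_pyGetD_take (A : List Int) (j : Nat) (hj : j ≤ A.length) :
    (PySem.List.pyRange 0 (j : Int) 1).map (fun r => PySem.List.pyGetD A r 0) = A.take j := by
  induction j with
  | zero => simp [PySem.List.pyRange_one_eq_nil]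
  | succ k ih =>
    rw [show ((k + 1 : Nat) : Int) = (k : Int) + 1 by push_cast; ring,
        PySem.List.pyRange_one_succ_right (by positivity), List.map_append,
        ih (by omega), List.take_add_one]
    have hk : k < A.length := by omega
    simp only [List.map_cons, List.map_nil]
    rw [PySem.List.pyGetD_eq_getElem A (i := (k : Int)) 0 (Int.natCast_nonneg k) (by exact_mod_cast hk)]
    simp [List.getElem?_eq_getElem hk]

theorem lb_iff (A : List Int) (xi : Int) (j : Nat) (hj : j ≤ A.length) :
    aInnerL A xi (PySem.List.pyRange ((j : Int) - 1) (-1) (-1)) = false ↔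
      ∀ y ∈ A.take j, y < xi := by
  rw [aInnerL_any,
      show PySem.List.pyRange ((j : Int) - 1) (-1) (-1)
        = (PySem.List.pyRange 0 (j : Int) 1).reverse by
        rw [PySem.List.pyRange_neg_one_eq_reverse]; norm_num,
      List.any_reverse,
      show (fun r => ! decide (PySem.List.pyGetD A r 0 < xi))
        = ((fun y => ! decide (y < xi)) ∘ (fun r => PySem.List.pyGetD A r 0)) from rfl,
      ← List.any_map, map_pyGetD_take A j hj]
  simp

-- the synchronised induction: A's outer loop from index j = B's zip loop from position j-1
theorem sync (A : List Int) (h3 : 3 ≤ A.length) :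
    ∀ (k j : Nat), 1 ≤ j → A.length - j ≤ k →
      aOuter A (PySem.List.pyRange (j : Int) ((A.length : Int) - 1) 1)
        = bZip ((runMax (PySem.List.pyGetD A 0 0) A).drop (j - 1)) (A.drop j)
            (((runMin (PySem.List.pyGetD A (-1) 0) A.reverse).reverse).drop (j + 1)) := by
  intro k
  induction k with
  | zero =>
    intro j hj hle
    have hjn : A.length ≤ j := by omega
    rw [PySem.List.pyRange_one_eq_nil (by omega),
        List.drop_eq_nil_of_le (as := A) (by omega), bZip_nil₂]
    rfl
  | succ k ih =>
    intro j hj hle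
    by_cases hjn : j < A.length - 1
    · -- step case
      have hjlen : j < A.length := by omega
      have hj1len : j + 1 < A.length := by omega
      have hsuflen : ((runMin (PySem.List.pyGetD A (-1) 0) A.reverse).reverse).length = A.length := by
        rw [List.length_reverse, length_runMin, List.length_reverse]
      have hpreflen : (runMax (PySem.List.pyGetD A 0 0) A).length = A.length := length_runMax _ _
      have hAne : A ≠ [] := by intro h; rw [h] at h3; simp at h3
      -- unfold one step of the outer loop
      rw [PySem.List.pyRange_one_cons (by omega)]
      show (let xi := PySem.List.pyGetD A (j : Int) 0
            let rb := aInnerR A xi (PySem.List.pyRange ((j : Int) + 1) (A.length : Int) 1)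
            let restart := rb || aInnerL A xi (PySem.List.pyRange ((j : Int) - 1) (-1) (-1))
            if restart then aOuter A (PySem.List.pyRange ((j : Int) + 1) ((A.length : Int) - 1) 1) else 1) = _
      simp only []
      -- unfold one step of the zip loop
      rw [List.drop_eq_getElem_cons (l := runMax (PySem.List.pyGetD A 0 0) A)
            (i := j - 1) (by rw [hpreflen]; omega),
          List.drop_eq_getElem_cons (l := A) (i := j) hjlen,
          List.drop_eq_getElem_cons (l := (runMin (PySem.List.pyGetD A (-1) 0) A.reverse).reverse)
            (i := j + 1) (by rw [hsuflen]; omega),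
          bZip]
      have hxi : PySem.List.pyGetD A (j : Int) 0 = A[j] := by
        rw [PySem.List.pyGetD_eq_getElem A 0 (by positivity) (by exact_mod_cast hjlen)]
        simp
      -- the B-side head values
      have hpref : (runMax (PySem.List.pyGetD A 0 0) A)[j - 1]'(by rw [hpreflen]; omega)
          = (A.take j).foldl max (PySem.List.pyGetD A 0 0) := by
        have h := runMax_getElem A (PySem.List.pyGetD A 0 0) (j - 1) (by omega)
        rw [show j - 1 + 1 = j from by omega] at h
        exact h
      have hsuf : ((runMin (PySem.List.pyGetD A (-1) 0) A.reverse).reverse)[j + 1]'(by rw [hsuflen]; omega)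
          = ((A.drop (j + 1)).reverse).foldl min (PySem.List.pyGetD A (-1) 0) := by
        have e1 := List.getElem_reverse (l := runMin (PySem.List.pyGetD A (-1) 0) A.reverse)
          (i := j + 1) (by rw [List.length_reverse, length_runMin, List.length_reverse]; omega)
        rw [e1]
        have hq : (runMin (PySem.List.pyGetD A (-1) 0) A.reverse).length - 1 - (j + 1)
            < A.reverse.length := by rw [length_runMin]; simp; omega
        have h := runMin_getElem A.reverse (PySem.List.pyGetD A (-1) 0)
          ((runMin (PySem.List.pyGetD A (-1) 0) A.reverse).length - 1 - (j + 1)) hq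
        rw [h, List.take_reverse]
        have hq2 : (runMin (PySem.List.pyGetD A (-1) 0) A.reverse).length - 1 - (j + 1) + 1
            = A.length - (j + 1) := by rw [length_runMin, List.length_reverse]; omega
        have hq3 : A.length - (A.length - (j + 1)) = j + 1 := by omega
        rw [hq2, hq3]
      -- memberships making the fold seeds redundant
      have ha0 : PySem.List.pyGetD A 0 0 ∈ A.take j := by
        rw [PySem.List.pyGetD_eq_getElem A 0 (by norm_num) (by exact_mod_cast (by omega : 0 < A.length))]
        have h0 : 0 < (A.take j).length := by simp; omega
        have ht : (A.take j)[0]'h0 = A[(0:Int).toNat] := by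
          show (A.take j)[0]'h0 = A[0]
          rw [List.getElem_take]
        exact ht ▸ List.getElem_mem h0
      have hlast : PySem.List.pyGetD A (-1) 0 ∈ A.drop (j + 1) := by
        rw [PySem.List.pyGetD_neg_one A 0 hAne, List.getLast_eq_getElem]
        have hlt : A.length - 1 - (j + 1) < (A.drop (j + 1)).length := by simp; omega
        have : (A.drop (j + 1))[A.length - 1 - (j + 1)]'hlt = A[A.length - 1] := by
          rw [List.getElem_drop]; congr 1; omega
        rw [← this]; exact List.getElem_mem hlt
      -- the condition equivalence
      have hcond : ((aInnerR A A[j] (PySem.List.pyRange ((j : Int) + 1) (A.length : Int) 1)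
              || aInnerL A A[j] (PySem.List.pyRange ((j : Int) - 1) (-1) (-1))) = false)
          ↔ ((A.take j).foldl max (PySem.List.pyGetD A 0 0) < A[j]
              ∧ A[j] < ((A.drop (j + 1)).reverse).foldl min (PySem.List.pyGetD A (-1) 0)) := by
        rw [Bool.or_eq_false_iff]
        rw [show ((j : Int) + 1) = ((j + 1 : Nat) : Int) by push_cast; ring]
        rw [rb_iff A A[j] (j + 1), lb_iff A A[j] j (by omega)]
        rw [foldl_max_lt_iff, lt_foldl_min_iff]
        constructor
        · rintro ⟨hr, hl⟩
          refine ⟨⟨?_, hl⟩, ?_, ?_⟩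
          · exact hl _ ha0
          · exact hr _ hlast
          · intro y hy; exact hr y (List.mem_reverse.mp hy)
        · rintro ⟨⟨_, hl⟩, _, hr⟩
          exact ⟨fun y hy => hr _ (List.mem_reverse.mpr hy), hl⟩
      rw [hxi, hpref, hsuf]
      by_cases hres : (aInnerR A A[j] (PySem.List.pyRange ((j : Int) + 1) (A.length : Int) 1)
          || aInnerL A A[j] (PySem.List.pyRange ((j : Int) - 1) (-1) (-1))) = true
      · -- restart: both loops continue
        rw [if_pos hres, if_neg]
        · rw [show ((j : Int) + 1) = ((j + 1 : Nat) : Int) by push_cast; ring,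
              show j - 1 + 1 = j from by omega]
          have := ih (j + 1) (by omega) (by omega)
          rw [show j + 1 - 1 = j from by omega] at this
          exact this
        · intro hc
          rw [(hcond.mpr hc)] at hres
          exact Bool.false_ne_true hres
      · -- no restart: both return 1
        rw [if_neg hres, if_pos (hcond.mp (Bool.eq_false_iff.mpr hres))]
    · -- range exhausted on both sides
      rw [PySem.List.pyRange_one_eq_nil (by omega)]
      by_cases hj0 : A.length ≤ j
      · rw [List.drop_eq_nil_of_le (as := A) (by omega), bZip_nil₂]; rfl
      · have : j = A.length - 1 := by omega
        rw [List.drop_eq_nil_of_le (as := (runMin (PySem.List.pyGetD A (-1) 0) A.reverse).reverse)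
              (by rw [List.length_reverse, length_runMin, List.length_reverse]; omega),
            bZip_nil₃]
        rfl

-- ===== VERDICT (by name: the statement is the Claim_ definition above) =====
theorem perfectPeak_spec : Claim_equal_perfectPeak := by
  intro A _
  unfold Spec_perfectPeak perfectPeak perfectPeak_alt
  by_cases h3 : A.length < 3
  · rw [if_pos h3, PySem.List.pyRange_one_eq_nil (by omega)]
    rfl
  · rw [if_neg h3]
    have hs := sync A (by omega) (A.length - 1) 1 le_rfl (by omega)
    simp only [Nat.cast_one] at hs
    rw [hs]
    simp [PySem.List.slice_from]
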